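-- pv_equiv track=rewrite | github.com/vibecoder10/economy-fastforward | skills/video-pipeline/image_prompt_engine/tests/test_sequencing.py | _consecutive_runs
-- ===== SOURCE A (Python) =====
-- def _consecutive_runs(assignments: list[dict]) -> list[tuple[str, int]]:
--     """Return a list of (style, run_length) for consecutive same-style runs."""
--     if not assignments:
--         return []
--     runs = []
--     current_style = assignments[0]["style"]
--     count = 1
--     for entry in assignments[1:]:
--         if entry["style"] == current_style:
--             count += 1
--         else:
--             runs.append((current_style, count))
--             current_style = entry["style"]
--             count = 1
--     runs.append((current_style, count))
--     return runs
-- ===== SOURCE B (Python) =====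
-- def _consecutive_runs(assignments: list[dict]) -> list[tuple[str, int]]:
--     """Return a list of (style, run_length) for consecutive same-style runs."""
--     runs = []
--     i = 0
--     n = len(assignments)
--     while i < n:
--         style = assignments[i]["style"]
--         j = i + 1
--         while j < n and assignments[j]["style"] == style:
--             j += 1
--         runs.append((style, j - i))
--         i = j
--     return runs
-- ===== Notes on version B (the rewrite author's own statement) =====
-- stated objective: alternative
-- what changed: Replaces A's current_style/count state machine (seed with first element, mutate counters per element, flush pending run at branch and after the loop) by a two-pointer run scanner: for each run start i, scan j forward while the style matches and emit (style, j-i) directly, so no pending-run state is carried.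
import Mathlib
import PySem

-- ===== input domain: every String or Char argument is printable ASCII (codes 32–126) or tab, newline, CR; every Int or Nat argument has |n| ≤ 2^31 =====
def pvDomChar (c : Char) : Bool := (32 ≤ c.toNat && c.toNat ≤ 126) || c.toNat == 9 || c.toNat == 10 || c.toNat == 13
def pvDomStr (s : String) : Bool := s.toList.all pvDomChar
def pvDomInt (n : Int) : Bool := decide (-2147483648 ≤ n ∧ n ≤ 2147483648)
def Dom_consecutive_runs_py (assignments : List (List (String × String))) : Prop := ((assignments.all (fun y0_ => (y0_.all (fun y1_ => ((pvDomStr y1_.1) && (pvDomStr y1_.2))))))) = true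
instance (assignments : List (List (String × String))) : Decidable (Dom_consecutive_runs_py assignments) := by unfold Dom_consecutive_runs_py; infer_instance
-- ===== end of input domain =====

-- B replaces A's current_style/count state machine by a two-pointer run scanner
-- (scan each run to its end and emit it directly); return values agree wherever
-- every entry carries a "style" key (elsewhere both Pythons raise KeyError).

-- entry["style"]: first-match association-list lookup (Python dict semantics);
-- the "" default is never reached under Pre_ (Python raises KeyError there).
def pyStyle (e : List (String × String)) : String :=
  ((e.find? (fun p => p.1 == "style")).map Prod.snd).getD ""

-- A's loop body as a named helper (the exact body of A's for-loop).
def aStep (st : List (String × Int) × String × Int) (entry : List (String × String)) :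
    List (String × Int) × String × Int :=
  if pyStyle entry == st.2.1 then (st.1, st.2.1, st.2.2 + 1)
  else (st.1 ++ [(st.2.1, st.2.2)], pyStyle entry, 1)

-- ===== PORT A =====
def consecutive_runs_py (assignments : List (List (String × String))) : List (String × Int) :=
  match assignments with
  | [] => []
  | first :: rest =>
    let st := rest.foldl aStep ([], pyStyle first, 1)
    st.1 ++ [(st.2.1, st.2.2)]

-- ===== PORT B =====
-- two-pointer scan: the inner `while j < n and assignments[j]["style"] == style`
-- is the takeWhile/dropWhile split of the remaining list; run length j - i = 1 + span.
def consecutive_runs_py_alt (assignments : List (List (String × String))) : List (String × Int) :=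
  match assignments with
  | [] => []
  | e :: rest =>
    let style := pyStyle e
    let same := rest.takeWhile (fun x => pyStyle x == style)
    (style, (1 + same.length : Int)) ::
      consecutive_runs_py_alt (rest.dropWhile (fun x => pyStyle x == style))
termination_by assignments.length
decreasing_by
  simp only [List.length_cons]
  exact Nat.lt_succ_of_le (List.length_dropWhile_le _ _)

-- ===== PRECONDITION & SPEC =====
-- Pre_ excludes exactly the inputs where an entry lacks a "style" key: there the
-- Python A raises KeyError (B raises identically).
def Pre_consecutive_runs_py (assignments : List (List (String × String))) : Prop :=
  (assignments.all (fun e => (e.find? (fun p => p.1 == "style")).isSome)) = true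
instance (assignments : List (List (String × String))) : Decidable (Pre_consecutive_runs_py assignments) := by
  unfold Pre_consecutive_runs_py; infer_instance

def pvWitness_consecutive_runs_py : (List (List (String × String))) :=
  [[("style", "noir")], [("style", "noir")], [("style", "pastel")]]

def Spec_consecutive_runs_py (assignments : List (List (String × String))) (out : List (String × Int)) : Prop := out = consecutive_runs_py_alt assignments
instance (assignments : List (List (String × String))) (out : List (String × Int)) : Decidable (Spec_consecutive_runs_py assignments out) := by unfold Spec_consecutive_runs_py; infer_instance

-- ===== CLAIM (what is proved, stated in full; the proofs are below) =====
def Claim_equal_consecutive_runs_py : Prop := ∀ (assignments : List (List (String × String))), Dom_consecutive_runs_py assignments → Pre_consecutive_runs_py assignments → Spec_consecutive_runs_py assignments (consecutive_runs_py assignments)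

-- ===== LEMMAS AND PROOFS =====

-- A's fold flushes `runs` prefix untouched and appends the runs of the remainder.
lemma aStep_foldl (rest : List (List (String × String))) :
    ∀ (runs : List (String × Int)) (s : String) (c : Int),
      (rest.foldl aStep (runs, s, c)).1 ++
          [((rest.foldl aStep (runs, s, c)).2.1, (rest.foldl aStep (runs, s, c)).2.2)]
        = runs ++
            (s, c + ((rest.takeWhile (fun x => pyStyle x == s)).length : Int)) ::
            consecutive_runs_py_alt (rest.dropWhile (fun x => pyStyle x == s)) := by
  induction rest with
  | nil =>
    intro runs s c
    simp [consecutive_runs_py_alt]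
  | cons e rest ih =>
    intro runs s c
    by_cases h : pyStyle e == s
    · have := ih runs s (c + 1)
      simp only [List.foldl_cons, aStep, h, if_pos, List.takeWhile_cons, List.dropWhile_cons] at *
      rw [this]
      have : c + 1 + ((rest.takeWhile (fun x => pyStyle x == s)).length : Int)
           = c + ((rest.takeWhile (fun x => pyStyle x == s)).length + 1 : Int) := by ring
      simp [this]
    · have := ih (runs ++ [(s, c)]) (pyStyle e) 1
      simp only [List.foldl_cons, aStep, h, if_neg, Bool.false_eq_true, not_false_iff,
        List.takeWhile_cons, List.dropWhile_cons] at *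
      rw [this]
      conv_rhs => rw [consecutive_runs_py_alt]
      simp

-- ===== VERDICT (by name: the statement is the Claim_ definition above) =====
theorem consecutive_runs_py_spec : Claim_equal_consecutive_runs_py := by
  intro assignments _ _
  unfold Spec_consecutive_runs_py
  cases assignments with
  | nil => rw [consecutive_runs_py, consecutive_runs_py_alt]
  | cons first rest =>
    rw [consecutive_runs_py]
    show (rest.foldl aStep ([], pyStyle first, 1)).1 ++ _ = _
    rw [aStep_foldl rest [] (pyStyle first) 1]
    conv_rhs => rw [consecutive_runs_py_alt]
    simp
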